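-- pv_equiv track=rewrite | github.com/ajithpunnakula/the-lab-miami-challenge | calendar_agent/utils/textbelt_sms.py | _optimize_for_sms
-- ===== SOURCE A (Python) =====
-- def _optimize_for_sms(message: str) -> str:
--     """Optimize message for SMS (160 chars for single segment)"""
--     # Remove extra whitespace
--     message = " ".join(message.split())
--
--     # Keep under 160 chars for single SMS
--     if len(message) > 160:
--         # Try to cut at a good spot
--         truncated = message[:157]
--
--         # Look for good cut points
--         cut_points = [
--             truncated.rfind('.'),
--             truncated.rfind('\n'),
--             truncated.rfind(' ')
--         ]
--
--         best_cut = max([p for p in cut_points if p > 100], default=-1)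
--
--         if best_cut > 0:
--             message = message[:best_cut] + "..."
--         else:
--             message = truncated + "..."
--
--     return message
-- ===== SOURCE B (Python) =====
-- def _optimize_for_sms(message: str) -> str:
--     """Optimize message for SMS (160 chars for single segment)"""
--     words = message.split()
--     message = " ".join(words)
--
--     if len(message) <= 160:
--         return message
--
--     # Word-walk: instead of scanning the truncated text for cut characters,
--     # walk the word list with a running position.  The only space characters
--     # in the normalized message are the join separators, so every candidate
--     # cut is either a separator position or a '.' inside a word.
--     best = -1
--     pos = 0
--     for w in words:
--         if pos > 157:
--             break
--         if pos and 100 < pos - 1 < 157: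
--             best = pos - 1  # the space before this word
--         for ch in w:
--             if ch == '.' and 100 < pos < 157:
--                 best = pos
--             pos += 1
--         pos += 1
--
--     if best > 0:
--         return message[:best] + "..."
--     return message[:157] + "..."
-- ===== Notes on version B (the rewrite author's own statement) =====
-- stated objective: alternative
-- what changed: Replaces the character-level rfind scans over the truncated text with a word-walk: it iterates over the word list produced by split() with a running position, exploiting that after normalization the only spaces are the join separators, so candidate cuts are separator positions and dots inside words.
import Mathlib
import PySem

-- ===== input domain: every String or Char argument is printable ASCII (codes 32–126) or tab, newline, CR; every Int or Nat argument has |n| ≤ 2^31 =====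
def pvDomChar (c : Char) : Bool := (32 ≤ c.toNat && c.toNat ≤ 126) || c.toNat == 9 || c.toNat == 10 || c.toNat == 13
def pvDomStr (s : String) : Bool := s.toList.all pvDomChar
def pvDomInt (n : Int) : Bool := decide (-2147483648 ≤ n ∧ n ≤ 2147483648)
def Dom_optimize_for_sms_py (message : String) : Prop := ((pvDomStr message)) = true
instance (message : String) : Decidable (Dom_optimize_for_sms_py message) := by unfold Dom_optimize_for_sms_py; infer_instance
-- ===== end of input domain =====

-- B replaces A's character-level rfind scans over the truncated text by a word-walk over the
-- list split() already produced, tracking a running position (alternative algorithm, same cost).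

-- ===== PORT A =====
def optimize_for_sms_py (message : String) : String :=
  -- message = " ".join(message.split())
  let m : List Char := PySem.Chars.join [' '] (PySem.Chars.split₀ message.toList)
  -- if len(message) > 160:
  if 160 < PySem.Chars.len m then
    -- truncated = message[:157]
    let truncated := PySem.Chars.slice m none (some 157)
    -- cut_points = [truncated.rfind('.'), truncated.rfind('\n'), truncated.rfind(' ')]
    let cut_points : List Int :=
      [PySem.Chars.rfind truncated ['.'],
       PySem.Chars.rfind truncated ['\n'],
       PySem.Chars.rfind truncated [' ']]
    -- best_cut = max([p for p in cut_points if p > 100], default=-1)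
    let best_cut := PySem.List.maxD (cut_points.filter (fun p => decide (100 < p))) (fun x => x) (-1)
    if 0 < best_cut then String.ofList (PySem.Chars.slice m none (some best_cut) ++ ['.', '.', '.'])
    else String.ofList (truncated ++ ['.', '.', '.'])
  else String.ofList m

-- ===== PORT B =====
-- the word-walk: 'for w in words: …' with running position pos and the rightmost cut best;
-- the inner 'for ch in w: …; pos += 1' is the foldl over the word's characters
def pvAltGo : List (List Char) → Int → Int → Int
  | [], best, _pos => best
  | w :: ws, best, pos =>
    if 157 < pos then best                                   -- 'if pos > 157: break'
    else
      -- 'if pos and 100 < pos - 1 < 157: best = pos - 1'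
      let best1 := if pos ≠ 0 ∧ 100 < pos - 1 ∧ pos - 1 < 157 then pos - 1 else best
      -- 'for ch in w: if ch == '.' and 100 < pos < 157: best = pos;  pos += 1'
      let bp := w.foldl
        (fun (bp : Int × Int) c =>
          (if c = '.' ∧ 100 < bp.2 ∧ bp.2 < 157 then bp.2 else bp.1, bp.2 + 1))
        (best1, pos)
      pvAltGo ws bp.1 (bp.2 + 1)                             -- 'pos += 1' after the word

def optimize_for_sms_py_alt (message : String) : String :=
  let words := PySem.Chars.split₀ message.toList
  let m : List Char := PySem.Chars.join [' '] words
  if PySem.Chars.len m ≤ 160 then String.ofList m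
  else
    let best := pvAltGo words (-1) 0
    if 0 < best then String.ofList (PySem.Chars.slice m none (some best) ++ ['.', '.', '.'])
    else String.ofList (PySem.Chars.slice m none (some 157) ++ ['.', '.', '.'])

-- ===== PRECONDITION & SPEC =====
def Spec_optimize_for_sms_py (message : String) (out : String) : Prop := out = optimize_for_sms_py_alt message
instance (message : String) (out : String) : Decidable (Spec_optimize_for_sms_py message out) := by unfold Spec_optimize_for_sms_py; infer_instance

-- ===== CLAIM (what is proved, stated in full; the proofs are below) =====
def Claim_equal_optimize_for_sms_py : Prop := ∀ (message : String), Dom_optimize_for_sms_py message → Spec_optimize_for_sms_py message (optimize_for_sms_py message)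

-- ===== LEMMAS AND PROOFS =====

-- index i of m is a valid cut point: above 100, inside the 157-window, and a cut character
def pvCut (m : List Char) (i : Nat) : Prop :=
  100 < i ∧ i ≤ 156 ∧ (m[i]? = some '.' ∨ m[i]? = some ' ' ∨ m[i]? = some '\n')

-- b is the rightmost cut point of m at an index < q, or -1 if there is none
def pvIsBestBelow (m : List Char) (q : Int) (b : Int) : Prop :=
  (b = -1 ∧ ∀ i : Nat, (i : Int) < q → ¬ pvCut m i) ∨
  (∃ i : Nat, b = (i : Int) ∧ (i : Int) < q ∧ pvCut m i ∧
    ∀ j : Nat, i < j → (j : Int) < q → ¬ pvCut m j)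

theorem pvIsBestBelow_unique (m : List Char) (q b b' : Int)
    (h : pvIsBestBelow m q b) (h' : pvIsBestBelow m q b') : b = b' := by
  rcases h with ⟨hb, hno⟩ | ⟨i, hbi, hiq, hci, hmax⟩
  · rcases h' with ⟨hb', _⟩ | ⟨i', hbi', hiq', hci', _⟩
    · rw [hb, hb']
    · exact absurd hci' (hno i' hiq')
  · rcases h' with ⟨hb', hno'⟩ | ⟨i', hbi', hiq', hci', hmax'⟩
    · exact absurd hci (hno' i hiq)
    · have h1 : ¬ i < i' := fun hlt => (hmax i' hlt hiq') hci'
      have h2 : ¬ i' < i := fun hlt => (hmax' i hlt hiq) hci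
      have : i = i' := by omega
      rw [hbi, hbi', this]

theorem pvIsBestBelow_shrink (m : List Char) (q b : Int) (hq : 157 ≤ q)
    (h : pvIsBestBelow m q b) : pvIsBestBelow m 157 b := by
  rcases h with ⟨hb, hno⟩ | ⟨i, hbi, _, hci, hmax⟩
  · exact Or.inl ⟨hb, fun i hi => hno i (by omega)⟩
  · refine Or.inr ⟨i, hbi, ?_, hci, fun j hj hj157 => hmax j hj (by omega)⟩
    have := hci.2.1
    omega

theorem pvIsBestBelow_extend (m : List Char) (q q' b : Int) (hqq : q ≤ q')
    (hreg : ∀ i : Nat, q ≤ (i : Int) → (i : Int) < q' → ¬ pvCut m i)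
    (h : pvIsBestBelow m q b) : pvIsBestBelow m q' b := by
  rcases h with ⟨hb, hno⟩ | ⟨i, hbi, hiq, hci, hmax⟩
  · refine Or.inl ⟨hb, fun i hi => ?_⟩
    by_cases hlt : (i : Int) < q
    · exact hno i hlt
    · exact hreg i (by omega) hi
  · refine Or.inr ⟨i, hbi, by omega, hci, fun j hj hj' => ?_⟩
    by_cases hlt : (j : Int) < q
    · exact hmax j hj hlt
    · exact hreg j (by omega) hj'

theorem pvIsBestBelow_push (m : List Char) (i : Nat) (hc : pvCut m i) :
    pvIsBestBelow m ((i : Int) + 1) ((i : Int)) := by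
  refine Or.inr ⟨i, rfl, by omega, hc, fun j hj hj' => ?_⟩
  omega

-- ---- A-side: characterizing rfind ----

-- a single-character prefix of a drop is the character at that index
theorem pvSingle_prefix (c : Char) (cs : List Char) (n : Nat) :
    ([c] <+: List.drop n cs) ↔ cs[n]? = some c := by
  rw [← List.head?_drop]
  cases h : List.drop n cs <;> simp [List.cons_prefix_iff, eq_comm]

theorem pvGoZero (cs : List Char) (c : Char) :
    PySem.Chars.rfind.go cs [c] 0 = if cs[0]? = some c then 0 else -1 := by
  simp [PySem.Chars.rfind.go, ← pvSingle_prefix c cs 0]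

theorem pvGoSucc (cs : List Char) (c : Char) (k : Nat) :
    PySem.Chars.rfind.go cs [c] (k+1) =
      if cs[k+1]? = some c then ((k:Int)+1) else PySem.Chars.rfind.go cs [c] k := by
  simp [PySem.Chars.rfind.go, ← pvSingle_prefix c cs (k+1)]

-- rfind.go scans indices k, k-1, …, 0 and returns the largest hit, else -1
theorem pvRfindGo_spec (cs : List Char) (c : Char) (k : Nat) :
    (PySem.Chars.rfind.go cs [c] k = -1 ∧ ∀ j : Nat, j ≤ k → cs[j]? ≠ some c) ∨
    (∃ j : Nat, j ≤ k ∧ cs[j]? = some c ∧ PySem.Chars.rfind.go cs [c] k = (j : Int) ∧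
      ∀ i : Nat, j < i → i ≤ k → cs[i]? ≠ some c) := by
  induction k with
  | zero =>
    by_cases h : cs[0]? = some c
    · exact Or.inr ⟨0, le_refl _, h, by rw [pvGoZero, if_pos h]; simp, by omega⟩
    · refine Or.inl ⟨by rw [pvGoZero, if_neg h], ?_⟩
      intro j hj; interval_cases j; exact h
  | succ k ih =>
    by_cases h : cs[k+1]? = some c
    · exact Or.inr ⟨k+1, le_refl _, h, by rw [pvGoSucc, if_pos h]; push_cast; ring, by omega⟩
    · have hgo : PySem.Chars.rfind.go cs [c] (k+1) = PySem.Chars.rfind.go cs [c] k := by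
        rw [pvGoSucc, if_neg h]
      rcases ih with ⟨h1, h2⟩ | ⟨j, hj, hcj, hgo2, hmax⟩
      · refine Or.inl ⟨by rw [hgo]; exact h1, ?_⟩
        intro j hj
        rcases Nat.lt_or_ge j (k+1) with hlt | hge
        · exact h2 j (by omega)
        · have hje : j = k+1 := by omega
          rw [hje]; exact h
      · refine Or.inr ⟨j, by omega, hcj, by rw [hgo]; exact hgo2, ?_⟩
        intro i hi1 hi2
        rcases Nat.lt_or_ge i (k+1) with hlt | hge
        · exact hmax i hi1 (by omega)
        · have hie : i = k+1 := by omega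
          rw [hie]; exact h

-- rfind for a single character: the largest index holding c, else -1
theorem pvRfind_spec (cs : List Char) (c : Char) :
    (PySem.Chars.rfind cs [c] = -1 ∧ ∀ j : Nat, cs[j]? ≠ some c) ∨
    (∃ j : Nat, j < cs.length ∧ cs[j]? = some c ∧ PySem.Chars.rfind cs [c] = (j : Int) ∧
      ∀ i : Nat, j < i → cs[i]? ≠ some c) := by
  rcases pvRfindGo_spec cs c cs.length with ⟨h1, h2⟩ | ⟨j, hj, hcj, hgo, hmax⟩
  · refine Or.inl ⟨h1, ?_⟩
    intro j
    rcases Nat.lt_or_ge j (cs.length + 1) with hlt | hge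
    · exact h2 j (by omega)
    · simp [List.getElem?_eq_none (by omega : cs.length ≤ j)]
  · have hjlt : j < cs.length := by
      by_contra hge
      rw [List.getElem?_eq_none (by omega : cs.length ≤ j)] at hcj
      exact absurd hcj (by simp)
    refine Or.inr ⟨j, hjlt, hcj, hgo, ?_⟩
    intro i hi
    rcases Nat.lt_or_ge i (cs.length + 1) with hlt | hge
    · exact hmax i hi (by omega)
    · simp [List.getElem?_eq_none (by omega : cs.length ≤ i)]

-- any occurrence bounds rfind from below
theorem pvRfind_ge (cs : List Char) (c : Char) (i : Nat) (h : cs[i]? = some c) :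
    (i : Int) ≤ PySem.Chars.rfind cs [c] := by
  rcases pvRfind_spec cs c with ⟨_, hno⟩ | ⟨j, _, _, heq, hmax⟩
  · exact absurd h (hno i)
  · rw [heq]
    by_contra hgt
    exact hmax i (by omega) h

-- A's best_cut is the rightmost cut point of m (below 157), or -1
theorem pvA_isBest (m : List Char) (hlen : 160 < m.length) :
    pvIsBestBelow m 157
      (PySem.List.maxD
        (List.filter (fun p => decide (100 < p))
          [PySem.Chars.rfind (PySem.Chars.slice m none (some 157)) ['.'],
           PySem.Chars.rfind (PySem.Chars.slice m none (some 157)) ['\n'],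
           PySem.Chars.rfind (PySem.Chars.slice m none (some 157)) [' ']])
        (fun x => x) (-1)) := by
  set t := PySem.Chars.slice m none (some 157) with htdef
  have ht : t = m.take 157 := by
    rw [htdef, PySem.Chars.slice_eq_listSlice, PySem.List.slice_to m (by norm_num),
      show Int.toNat 157 = 157 from rfl]
  have htlen : t.length = 157 := by
    rw [ht, List.length_take]; omega
  have htm : ∀ i : Nat, i ≤ 156 → t[i]? = m[i]? := by
    intro i hi
    rw [ht]; exact List.getElem?_take_of_lt (by omega)
  -- a cut point at i forces one of the three rfinds past i
  have hforce : ∀ i : Nat, pvCut m i → ∃ c, (c = '.' ∨ c = '\n' ∨ c = ' ') ∧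
      (i : Int) ≤ PySem.Chars.rfind t [c] := by
    intro i hc
    obtain ⟨h100, h156, hchar⟩ := hc
    rcases hchar with h | h | h
    · exact ⟨'.', Or.inl rfl, pvRfind_ge t '.' i (by rw [htm i h156]; exact h)⟩
    · exact ⟨' ', Or.inr (Or.inr rfl), pvRfind_ge t ' ' i (by rw [htm i h156]; exact h)⟩
    · exact ⟨'\n', Or.inr (Or.inl rfl), pvRfind_ge t '\n' i (by rw [htm i h156]; exact h)⟩
  set fl := List.filter (fun p => decide (100 < p))
      [PySem.Chars.rfind t ['.'], PySem.Chars.rfind t ['\n'], PySem.Chars.rfind t [' ']] with hfl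
  have hmemfl : ∀ c, (c = '.' ∨ c = '\n' ∨ c = ' ') → 100 < PySem.Chars.rfind t [c] →
      PySem.Chars.rfind t [c] ∈ fl := by
    intro c hc h100
    refine List.mem_filter.2 ⟨?_, by simpa using h100⟩
    rcases hc with h | h | h <;> rw [h] <;> simp
  cases hmx : PySem.List.max? fl (fun x => x) with
  | none =>
    rw [PySem.List.max?_eq_none_iff] at hmx
    have hres : PySem.List.maxD fl (fun x => x) (-1) = -1 := by
      rw [PySem.List.maxD, hmx]; rfl
    rw [hres]
    refine Or.inl ⟨rfl, fun i _ hc => ?_⟩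
    obtain ⟨c, hcset, hge⟩ := hforce i hc
    have h100 : 100 < PySem.Chars.rfind t [c] := by
      have := hc.1; omega
    have := hmemfl c hcset h100
    rw [hmx] at this
    simp at this
  | some b =>
    have hres : PySem.List.maxD fl (fun x => x) (-1) = b := by
      rw [PySem.List.maxD, hmx]; rfl
    rw [hres]
    have hble : ∀ y ∈ fl, y ≤ b := fun y hy => PySem.List.max?_isMax hmx y hy
    have hbF := List.mem_filter.1 (PySem.List.max?_mem hmx)
    have hb100 : 100 < b := by simpa using hbF.2
    have hbL := hbF.1
    simp only [List.mem_cons, List.not_mem_nil, or_false] at hbL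
    -- b = rfind t [c] for some cut character c; read off its occurrence index
    have hbocc : ∃ j : Nat, b = (j : Int) ∧ pvCut m j := by
      have key : ∀ c, (c = '.' ∨ c = '\n' ∨ c = ' ') → b = PySem.Chars.rfind t [c] →
          ∃ j : Nat, b = (j : Int) ∧ pvCut m j := by
        intro c hcset hbeq
        rcases pvRfind_spec t c with ⟨heq, _⟩ | ⟨j, hjlt, hcj, heq, _⟩
        · rw [hbeq, heq] at hb100; omega
        · refine ⟨j, by rw [hbeq, heq], ?_, by omega, ?_⟩
          · rw [hbeq, heq] at hb100; exact_mod_cast hb100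
          · rw [← htm j (by omega), hcj]
            rcases hcset with h | h | h
            · rw [h]; exact Or.inl rfl
            · rw [h]; exact Or.inr (Or.inr rfl)
            · rw [h]; exact Or.inr (Or.inl rfl)
      rcases hbL with h | h | h
      · exact key '.' (Or.inl rfl) h
      · exact key '\n' (Or.inr (Or.inl rfl)) h
      · exact key ' ' (Or.inr (Or.inr rfl)) h
    obtain ⟨j, hbj, hcj⟩ := hbocc
    refine Or.inr ⟨j, hbj, by have := hcj.2.1; omega, hcj, fun k hk _ hck => ?_⟩
    obtain ⟨c, hcset, hge⟩ := hforce k hck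
    have h100 : 100 < PySem.Chars.rfind t [c] := by have := hck.1; omega
    have hle := hble _ (hmemfl c hcset h100)
    omega

-- ---- B-side: split₀ produces nonempty whitespace-free words ----

theorem pvSplit₀Go_clean (s : List Char) : ∀ (cur : List Char) (acc : List (List Char)),
    (∀ c ∈ cur, PySem.Chars.isspace c = false) →
    (∀ w ∈ acc, w ≠ [] ∧ ∀ c ∈ w, PySem.Chars.isspace c = false) →
    ∀ w ∈ PySem.Chars.split₀.go s cur acc, w ≠ [] ∧ ∀ c ∈ w, PySem.Chars.isspace c = false := by
  induction s with
  | nil =>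
    intro cur acc hcur hacc w hw
    simp only [PySem.Chars.split₀.go] at hw
    by_cases hc : cur.isEmpty
    · rw [if_pos hc] at hw
      exact hacc w (by simpa using hw)
    · rw [if_neg hc] at hw
      rw [List.mem_reverse, List.mem_cons] at hw
      rcases hw with hw | hw
      · subst hw
        constructor
        · simpa [List.isEmpty_iff] using hc
        · intro c hc'; exact hcur c (by simpa using hc')
      · exact hacc w hw
  | cons c rest ih =>
    intro cur acc hcur hacc w hw
    simp only [PySem.Chars.split₀.go] at hw
    by_cases hsp : PySem.Chars.isspace c
    · rw [if_pos hsp] at hw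
      by_cases hc : cur.isEmpty
      · rw [if_pos hc] at hw
        exact ih [] acc (by simp) hacc w hw
      · rw [if_neg hc] at hw
        refine ih [] (cur.reverse :: acc) (by simp) ?_ w hw
        intro w' hw'
        rw [List.mem_cons] at hw'
        rcases hw' with hw' | hw'
        · subst hw'
          exact ⟨by simpa [List.isEmpty_iff] using hc, fun c' hc' => hcur c' (by simpa using hc')⟩
        · exact hacc w' hw'
    · rw [if_neg hsp] at hw
      refine ih (c :: cur) acc ?_ hacc w hw
      intro c' hc'
      rw [List.mem_cons] at hc'
      rcases hc' with h | h
      · rw [h]; simpa using hsp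
      · exact hcur c' h

theorem pvSplit₀_clean (s : List Char) :
    ∀ w ∈ PySem.Chars.split₀ s, w ≠ [] ∧ ∀ c ∈ w, PySem.Chars.isspace c = false := by
  intro w hw
  exact pvSplit₀Go_clean s [] [] (by simp) (by simp) w hw

-- ---- B-side: the inner character fold ----

theorem pvInner_spec (m : List Char) : ∀ (w A R : List Char) (b : Int),
    m = A ++ w ++ R →
    (∀ c ∈ w, PySem.Chars.isspace c = false) →
    pvIsBestBelow m (A.length : Int) b →
    (w.foldl
      (fun (bp : Int × Int) c =>
        (if c = '.' ∧ 100 < bp.2 ∧ bp.2 < 157 then bp.2 else bp.1, bp.2 + 1))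
      (b, (A.length : Int))).2 = (A.length : Int) + w.length ∧
    pvIsBestBelow m ((A.length : Int) + w.length)
      (w.foldl
        (fun (bp : Int × Int) c =>
          (if c = '.' ∧ 100 < bp.2 ∧ bp.2 < 157 then bp.2 else bp.1, bp.2 + 1))
        (b, (A.length : Int))).1 := by
  intro w
  induction w with
  | nil =>
    intro A R b hm hclean hb
    simpa using hb
  | cons c w ih =>
    intro A R b hm hclean hb
    have hmc : m[A.length]? = some c := by
      rw [hm]
      rw [show A ++ (c :: w) ++ R = A ++ (c :: (w ++ R)) by simp]
      simp
    have hstep : ∀ b1 : Int,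
        pvIsBestBelow m ((A.length : Int) + 1) b1 →
        (List.foldl
          (fun (bp : Int × Int) c =>
            (if c = '.' ∧ 100 < bp.2 ∧ bp.2 < 157 then bp.2 else bp.1, bp.2 + 1))
          (b1, (A.length : Int) + 1) w).2 = (A.length : Int) + (w.length + 1) ∧
        pvIsBestBelow m ((A.length : Int) + (w.length + 1))
          (List.foldl
            (fun (bp : Int × Int) c =>
              (if c = '.' ∧ 100 < bp.2 ∧ bp.2 < 157 then bp.2 else bp.1, bp.2 + 1))
            (b1, (A.length : Int) + 1) w).1 := by
      intro b1 hb1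
      have hm' : m = (A ++ [c]) ++ w ++ R := by rw [hm]; simp
      have := ih (A ++ [c]) R b1 hm' (fun c' hc' => hclean c' (by simp [hc'])) (by
        simpa using hb1)
      simpa [add_comm, add_left_comm, add_assoc] using this
    simp only [List.foldl_cons]
    by_cases hcond : c = '.' ∧ 100 < (A.length : Int) ∧ (A.length : Int) < 157
    · rw [if_pos hcond]
      have hcut : pvCut m A.length := by
        refine ⟨by exact_mod_cast hcond.2.1, by omega, ?_⟩
        rw [hmc, hcond.1]; exact Or.inl rfl
      have := hstep (A.length : Int) (pvIsBestBelow_push m A.length hcut)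
      simpa [add_comm, add_left_comm, add_assoc] using this
    · rw [if_neg hcond]
      have hnocut : ¬ pvCut m A.length := by
        intro hcut
        obtain ⟨h100, h156, hchar⟩ := hcut
        have hcs : PySem.Chars.isspace c = false := hclean c (by simp)
        rcases hchar with h | h | h
        · rw [hmc] at h
          have : c = '.' := by injection h
          exact hcond ⟨this, by exact_mod_cast h100, by omega⟩
        · rw [hmc] at h
          have : c = ' ' := by injection h
          rw [this] at hcs; simp [PySem.Chars.isspace] at hcs
        · rw [hmc] at h
          have : c = '\n' := by injection h
          rw [this] at hcs; simp [PySem.Chars.isspace] at hcs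
      have hb1 : pvIsBestBelow m ((A.length : Int) + 1) b := by
        refine pvIsBestBelow_extend m (A.length : Int) ((A.length : Int) + 1) b (by omega) ?_ hb
        intro i hi1 hi2
        have : i = A.length := by omega
        rw [this]; exact hnocut
      have := hstep b hb1
      simpa [add_comm, add_left_comm, add_assoc] using this

-- ---- B-side: the outer word walk ----

theorem pvAltGo_spec (m : List Char) : ∀ (ws : List (List Char)) (p : Nat) (b : Int),
    (∀ w ∈ ws, w ≠ [] ∧ ∀ c ∈ w, PySem.Chars.isspace c = false) →
    ((ws = [] ∧ ∀ i : Nat, (p : Int) - 1 ≤ (i : Int) → m[i]? = none) ∨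
     (ws ≠ [] ∧ ∃ A : List Char, m = A ++ PySem.Chars.join [' '] ws ∧ A.length = p ∧
        (0 < p → m[p-1]? = some ' '))) →
    pvIsBestBelow m ((p : Int) - 1) b →
    pvIsBestBelow m 157 (pvAltGo ws b (p : Int)) := by
  intro ws
  induction ws with
  | nil =>
    intro p b _ hstruct hb
    rcases hstruct with ⟨_, hnone⟩ | ⟨hne, _⟩
    · simp only [pvAltGo]
      by_cases hq : (p : Int) - 1 ≤ 157
      · refine pvIsBestBelow_shrink m 157 b (le_refl _) ?_
        refine pvIsBestBelow_extend m ((p : Int) - 1) 157 b hq ?_ hb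
        intro i hi1 _ hc
        have := hc.2.2
        rw [hnone i hi1] at this
        rcases this with h | h | h <;> exact absurd h (by simp)
      · exact pvIsBestBelow_shrink m ((p : Int) - 1) b (by omega) hb
    · exact absurd rfl hne
  | cons w ws ih =>
    intro p b hclean hstruct hb
    rcases hstruct with ⟨hnil, _⟩ | ⟨_, A, hm, hA, hsp⟩
    · exact absurd hnil (by simp)
    simp only [pvAltGo]
    by_cases hbrk : 157 < (p : Int)
    · rw [if_pos hbrk]
      exact pvIsBestBelow_shrink m ((p : Int) - 1) b (by omega) hb
    rw [if_neg hbrk]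
    have hp157 : p ≤ 157 := by omega
    -- the space step
    have hbest1 : pvIsBestBelow m (p : Int)
        (if (p : Int) ≠ 0 ∧ 100 < (p : Int) - 1 ∧ (p : Int) - 1 < 157 then (p : Int) - 1 else b) := by
      by_cases hcond : (p : Int) ≠ 0 ∧ 100 < (p : Int) - 1 ∧ (p : Int) - 1 < 157
      · rw [if_pos hcond]
        have hp0 : 0 < p := by omega
        have hcut : pvCut m (p - 1) := by
          refine ⟨by omega, by omega, ?_⟩
          rw [hsp hp0]; exact Or.inr (Or.inl rfl)
        have hcast : ((p - 1 : Nat) : Int) = (p : Int) - 1 := by omega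
        have := pvIsBestBelow_push m (p - 1) hcut
        rw [hcast] at this
        have hq : (p : Int) - 1 + 1 = (p : Int) := by omega
        rwa [hq] at this
      · rw [if_neg hcond]
        refine pvIsBestBelow_extend m ((p : Int) - 1) (p : Int) b (by omega) ?_ hb
        intro i hi1 hi2 hc
        have hip : i = p - 1 ∧ 0 < p := by omega
        have := hc.1
        omega
    -- the word structure: m = A ++ w ++ R
    obtain ⟨R, hmR, hR⟩ : ∃ R, m = A ++ w ++ R ∧
        ((ws = [] ∧ R = []) ∨ (ws ≠ [] ∧ R = ' ' :: PySem.Chars.join [' '] ws)) := by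
      cases ws with
      | nil =>
        refine ⟨[], ?_, Or.inl ⟨rfl, rfl⟩⟩
        rw [hm, PySem.Chars.join_singleton]; simp
      | cons w2 ws2 =>
        refine ⟨' ' :: PySem.Chars.join [' '] (w2 :: ws2), ?_, Or.inr ⟨by simp, rfl⟩⟩
        rw [hm, PySem.Chars.join_cons_cons]; simp
    have hclean_w : ∀ c ∈ w, PySem.Chars.isspace c = false := (hclean w (by simp)).2
    have hAp : (A.length : Int) = (p : Int) := by exact_mod_cast hA
    obtain ⟨hsnd, hfst⟩ := pvInner_spec m w A R
      (if (p : Int) ≠ 0 ∧ 100 < (p : Int) - 1 ∧ (p : Int) - 1 < 157 then (p : Int) - 1 else b)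
      hmR hclean_w (by rw [hAp]; exact hbest1)
    rw [hAp] at hsnd hfst
    rw [hsnd]
    have hp' : ((p + w.length + 1 : Nat) : Int) = (p : Int) + w.length + 1 := by push_cast; ring
    have hgoal : pvAltGo ws
        (List.foldl (fun (bp : Int × Int) c =>
          (if c = '.' ∧ 100 < bp.2 ∧ bp.2 < 157 then bp.2 else bp.1, bp.2 + 1))
          ((if (p : Int) ≠ 0 ∧ 100 < (p : Int) - 1 ∧ (p : Int) - 1 < 157 then (p : Int) - 1 else b), (p : Int)) w).1
        ((p + w.length + 1 : Nat) : Int) = pvAltGo ws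
        (List.foldl (fun (bp : Int × Int) c =>
          (if c = '.' ∧ 100 < bp.2 ∧ bp.2 < 157 then bp.2 else bp.1, bp.2 + 1))
          ((if (p : Int) ≠ 0 ∧ 100 < (p : Int) - 1 ∧ (p : Int) - 1 < 157 then (p : Int) - 1 else b), (p : Int)) w).1
        ((p : Int) + w.length + 1) := by rw [hp']
    rw [← hgoal]
    refine ih (p + w.length + 1) _ (fun w' hw' => hclean w' (by simp [hw'])) ?_ ?_
    · rcases hR with ⟨hws, hRe⟩ | ⟨hws, hRe⟩
      · refine Or.inl ⟨hws, fun i hi => ?_⟩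
        apply List.getElem?_eq_none
        rw [hmR, hRe]
        simp only [List.append_nil, List.length_append]
        rw [hA] at *
        push_cast at hi
        omega
      · refine Or.inr ⟨hws, A ++ w ++ [' '], ?_, by simp [hA]; omega, ?_⟩
        · rw [hmR, hRe]; simp
        · intro _
          rw [hmR, hRe]
          have : p + w.length + 1 - 1 = (A ++ w).length := by simp [hA]
          rw [this]
          rw [show A ++ w ++ (' ' :: PySem.Chars.join [' '] ws) = (A ++ w) ++ (' ' :: PySem.Chars.join [' '] ws) by simp]
          simp
    · have : ((p + w.length + 1 : Nat) : Int) - 1 = (p : Int) + w.length := by push_cast; ring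
      rw [this]
      exact hfst

-- B's best is also the rightmost cut point of m (below 157), or -1
theorem pvB_isBest (s : List Char) :
    pvIsBestBelow (PySem.Chars.join [' '] (PySem.Chars.split₀ s)) 157
      (pvAltGo (PySem.Chars.split₀ s) (-1) 0) := by
  set words := PySem.Chars.split₀ s with hwords
  set m := PySem.Chars.join [' '] words with hm
  have h0 : ((0 : Nat) : Int) = (0 : Int) := rfl
  rw [← h0]
  refine pvAltGo_spec m words 0 (-1) (fun w hw => pvSplit₀_clean s w hw) ?_ ?_
  · cases hwe : words with
    | nil =>
      refine Or.inl ⟨rfl, fun i _ => ?_⟩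
      apply List.getElem?_eq_none
      rw [hm, hwe, PySem.Chars.join_nil]
      simp
    | cons w ws =>
      refine Or.inr ⟨by simp, [], by rw [hm, hwe]; simp, rfl, by omega⟩
  · exact Or.inl ⟨rfl, fun i hi => by omega⟩

-- ===== VERDICT (by name: the statement is the Claim_ definition above) =====
theorem optimize_for_sms_py_spec : Claim_equal_optimize_for_sms_py := by
  intro message _
  unfold Spec_optimize_for_sms_py
  show optimize_for_sms_py message = optimize_for_sms_py_alt message
  simp only [optimize_for_sms_py, optimize_for_sms_py_alt]
  set m := PySem.Chars.join [' '] (PySem.Chars.split₀ message.toList) with hm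
  by_cases hlen : 160 < PySem.Chars.len m
  · have hlen' : 160 < m.length := by
      have := hlen
      rw [PySem.Chars.len_eq] at this
      exact_mod_cast this
    have hne : ¬ PySem.Chars.len m ≤ 160 := by omega
    rw [if_pos hlen, if_neg hne]
    have hbest : PySem.List.maxD
        (List.filter (fun p => decide (100 < p))
          [PySem.Chars.rfind (PySem.Chars.slice m none (some 157)) ['.'],
           PySem.Chars.rfind (PySem.Chars.slice m none (some 157)) ['\n'],
           PySem.Chars.rfind (PySem.Chars.slice m none (some 157)) [' ']])
        (fun x => x) (-1) = pvAltGo (PySem.Chars.split₀ message.toList) (-1) 0 :=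
      pvIsBestBelow_unique m 157 _ _ (pvA_isBest m hlen') (by rw [hm]; exact pvB_isBest message.toList)
    rw [hbest]
  · have hle : PySem.Chars.len m ≤ 160 := by omega
    rw [if_neg hlen, if_pos hle]
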